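-- pv_equiv track=rewrite | github.com/dudepare/topcoder | advertisingagency.py | numberOfRejections
-- ===== SOURCE A (Python) =====
-- def numberOfRejections(requests):
-- 	rejected = 0
--
-- 	for i in range(len(requests)):
-- 		if requests[i] != -1:
-- 			for j in range(i+1, len(requests)):
-- 				if requests[i] == requests[j]:
-- 					requests[j] = -1
-- 					rejected += 1
-- 	return rejected
-- ===== SOURCE B (Python) =====
-- def numberOfRejections(requests):
--     # One pass builds a count of each non-(-1) value; the nested rescanning
--     # and the in-place marking disappear (return value only; unlike A, B does
--     # not mutate `requests`).
--     counts = {}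
--     for v in requests:
--         if v != -1:
--             counts[v] = counts.get(v, 0) + 1
--     rejected = 0
--     for c in counts.values():
--         rejected += c - 1
--     return rejected
-- ===== Notes on version B (the rewrite author's own statement) =====
-- stated objective: faster
-- what changed: Replaced A's nested forward rescans with in-place -1 marking by a single counting pass into a dict followed by summing (count-1) over the groups; B does not mutate the input list (equivalence is about the return value).
import Mathlib
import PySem

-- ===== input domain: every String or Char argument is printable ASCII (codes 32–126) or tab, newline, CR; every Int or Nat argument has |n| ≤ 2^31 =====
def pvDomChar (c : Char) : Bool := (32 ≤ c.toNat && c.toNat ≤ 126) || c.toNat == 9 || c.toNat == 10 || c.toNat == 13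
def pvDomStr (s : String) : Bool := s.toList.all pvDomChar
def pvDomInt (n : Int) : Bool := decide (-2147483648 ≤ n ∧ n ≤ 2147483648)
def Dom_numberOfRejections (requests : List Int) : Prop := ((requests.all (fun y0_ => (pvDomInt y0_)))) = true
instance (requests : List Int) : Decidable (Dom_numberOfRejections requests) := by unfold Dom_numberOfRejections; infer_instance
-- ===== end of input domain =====

-- B replaces A's quadratic rescan-and-mark with one counting pass and a sum over the groups
-- (return value only: A mutates `requests` in place, B does not).

-- ===== PORT A =====
-- inner loop: for j in range(i+1, len(requests)): if requests[i] == requests[j]: requests[j] = -1; rejected += 1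
-- (fuel = number of remaining loop iterations, always called with enough fuel: l.length)
def pvInnerA (fuel : Nat) (l : List Int) (i j : Nat) (rej : Int) : List Int × Int :=
  match fuel with
  | 0 => (l, rej)
  | fuel + 1 =>
    if j < l.length then
      if l.getD i 0 = l.getD j 0 then
        pvInnerA fuel (l.set j (-1)) i (j + 1) (rej + 1)
      else
        pvInnerA fuel l i (j + 1) rej
    else
      (l, rej)

-- outer loop: for i in range(len(requests)): if requests[i] != -1: <inner loop>
def pvOuterA (fuel : Nat) (l : List Int) (i : Nat) (rej : Int) : Int :=
  match fuel with
  | 0 => rej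
  | fuel + 1 =>
    if i < l.length then
      if l.getD i 0 ≠ -1 then
        let p := pvInnerA l.length l i (i + 1) rej
        pvOuterA fuel p.1 (i + 1) p.2
      else
        pvOuterA fuel l (i + 1) rej
    else
      rej

def numberOfRejections (requests : List Int) : Int :=
  pvOuterA requests.length requests 0 0

-- ===== PORT B =====
def numberOfRejections_alt (requests : List Int) : Int :=
  let counts : PySem.Dict Int Int :=
    requests.foldl (fun d v => if v ≠ -1 then d.insert v (d.getD v 0 + 1) else d) PySem.Dict.empty
  (PySem.Dict.values counts).foldl (fun rej c => rej + (c - 1)) 0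

-- ===== PRECONDITION & SPEC =====
def Spec_numberOfRejections (requests : List Int) (out : Int) : Prop := out = numberOfRejections_alt requests
instance (requests : List Int) (out : Int) : Decidable (Spec_numberOfRejections requests out) := by unfold Spec_numberOfRejections; infer_instance

-- ===== CLAIM (what is proved, stated in full; the proofs are below) =====
def Claim_equal_numberOfRejections : Prop := ∀ (requests : List Int), Dom_numberOfRejections requests → Spec_numberOfRejections requests (numberOfRejections requests)

-- ===== LEMMAS AND PROOFS =====

-- closed recursion capturing A's behaviour on the suffix not yet processed
def pvG : List Int → Int
  | [] => 0
  | v :: t =>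
    if v = -1 then pvG t
    else (t.count v : Int) + pvG (t.map (fun x => if x = v then -1 else x))
  termination_by l => l.length
  decreasing_by
    · simp
    · simp

theorem pv_take_len (l : List Int) (j : Nat) (h : j ≤ l.length) : (List.take j l).length = j := by
  simp [h]

theorem pv_drop_set (l : List Int) (j : Nat) (h : j < l.length) (a : Int) :
    (l.set j a).drop (j+1) = l.drop (j+1) := by
  rw [List.set_eq_take_append_cons_drop, if_pos h, List.drop_append]
  simp [Nat.le_of_lt h]

theorem pv_take_set (l : List Int) (j : Nat) (h : j < l.length) (a : Int) :
    (l.set j a).take (j+1) = l.take j ++ [a] := by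
  rw [List.set_eq_take_append_cons_drop, if_pos h, List.take_append]
  simp [Nat.le_of_lt h]

theorem pv_getD_set_ne (l : List Int) (i j : Nat) (h : i ≠ j) (a : Int) :
    (l.set j a).getD i 0 = l.getD i 0 := by
  simp [List.getD_eq_getElem?_getD, List.getElem?_set_ne h.symm]

theorem pv_drop_cons (l : List Int) (j : Nat) (h : j < l.length) :
    l.drop j = l.getD j 0 :: l.drop (j+1) := by
  rw [List.getD_eq_getElem?_getD, List.getElem?_eq_getElem h]
  simp [List.getElem_cons_drop]

theorem pv_take_succ (l : List Int) (j : Nat) (h : j < l.length) :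
    l.take (j+1) = l.take j ++ [l.getD j 0] := by
  rw [List.take_add_one, List.getD_eq_getElem?_getD, List.getElem?_eq_getElem h]
  rfl

theorem pvInnerA_spec (fuel : Nat) (l : List Int) (i j : Nat) (rej : Int)
    (hf : l.length ≤ j + fuel) (hij : i < j) :
    pvInnerA fuel l i j rej =
      (l.take j ++ (l.drop j).map (fun x => if x = l.getD i 0 then -1 else x),
       rej + ((l.drop j).count (l.getD i 0) : Int)) := by
  induction fuel generalizing l j rej with
  | zero =>
    have hlen : l.length ≤ j := by omega
    simp [pvInnerA, List.drop_eq_nil_of_le hlen, List.take_of_length_le hlen]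
  | succ fuel ih =>
    rw [pvInnerA]
    by_cases h : j < l.length
    · rw [if_pos h]
      by_cases heq : l.getD i 0 = l.getD j 0
      · rw [if_pos heq]
        rw [ih (l.set j (-1)) (j+1) (rej+1) (by rw [List.length_set]; omega) (by omega)]
        rw [pv_getD_set_ne l i j (by omega), pv_drop_set l j h, pv_take_set l j h,
            pv_drop_cons l j h]
        rw [Prod.mk.injEq]
        constructor
        · rw [List.map_cons, if_pos heq.symm, List.append_assoc]
          rfl
        · rw [List.count_cons, if_pos (by exact heq.symm ▸ beq_self_eq_true _)]
          push_cast
          ring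
      · rw [if_neg heq]
        rw [ih l (j+1) rej (by omega) (by omega), pv_drop_cons l j h]
        rw [Prod.mk.injEq]
        constructor
        · rw [pv_take_succ l j h, List.map_cons, if_neg (fun hx => heq hx.symm), List.append_assoc]
          rfl
        · rw [List.count_cons, if_neg (by simp; exact fun hx => heq hx.symm)]
          simp
    · rw [if_neg h]
      have hlen : l.length ≤ j := by omega
      simp [List.drop_eq_nil_of_le hlen, List.take_of_length_le hlen]

theorem pv_drop_len_append (X Y : List Int) (k : Nat) (h : X.length = k) :
    (X ++ Y).drop k = Y := by
  subst h
  simp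

theorem pvOuterA_spec (fuel : Nat) (l : List Int) (i : Nat) (rej : Int)
    (hf : l.length ≤ i + fuel) :
    pvOuterA fuel l i rej = rej + pvG (l.drop i) := by
  induction fuel generalizing l i rej with
  | zero =>
    have hlen : l.length ≤ i := by omega
    rw [pvOuterA, List.drop_eq_nil_of_le hlen, pvG]
    ring
  | succ fuel ih =>
    rw [pvOuterA]
    by_cases h : i < l.length
    · rw [if_pos h]
      by_cases hne : l.getD i 0 ≠ -1
      · rw [if_pos hne]
        rw [pvInnerA_spec l.length l i (i+1) rej (by omega) (by omega)]
        rw [ih _ (i+1) _ (by simp [pv_take_len l (i+1) (by omega)]; omega)]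
        rw [pv_drop_len_append _ _ (i+1) (pv_take_len l (i+1) (by omega))]
        rw [pv_drop_cons l i h, pvG]
        rw [if_neg hne]
        ring
      · rw [if_neg hne]
        rw [ih l (i+1) rej (by omega), pv_drop_cons l i h, pvG]
        rw [if_pos (by omega)]
    · rw [if_neg h]
      rw [List.drop_eq_nil_of_le (by omega), pvG]
      ring

theorem pv_filter_map (v : Int) (hv : v ≠ -1) (t : List Int) :
    (t.map (fun x => if x = v then -1 else x)).filter (fun x => x ≠ -1)
      = (t.filter (fun x => x ≠ -1)).filter (fun x => x ≠ v) := by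
  induction t with
  | nil => rfl
  | cons a t ih =>
    simp only [List.filter_filter] at ih ⊢
    simp only [ne_eq, decide_not] at ih ⊢
    by_cases hav : a = v
    · subst hav
      simpa [hv] using ih
    · by_cases ha1 : a = -1 <;> simp [hav, ha1] <;> exact ih

theorem pv_len_filter_ne (v : Int) (F : List Int) :
    (F.filter (fun x => x ≠ v)).length + F.count v = F.length := by
  induction F with
  | nil => rfl
  | cons a F ih =>
    simp only [ne_eq, decide_not] at ih ⊢
    by_cases hav : a = v <;> simp [List.filter_cons, List.count_cons, hav] <;> omega

theorem pvG_spec (l : List Int) :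
    pvG l = ((l.filter (fun x => x ≠ -1)).length : Int)
            - ((l.filter (fun x => x ≠ -1)).toFinset.card : Int) := by
  have main : ∀ (n : Nat) (l : List Int), l.length ≤ n →
      pvG l = ((l.filter (fun x => x ≠ -1)).length : Int)
              - ((l.filter (fun x => x ≠ -1)).toFinset.card : Int) := by
    intro n
    induction n with
    | zero =>
      intro l hl
      rw [List.length_eq_zero_iff.mp (Nat.le_zero.mp hl)]
      simp [pvG]
    | succ n ihn =>
      intro l hl
      match l with
      | [] => simp [pvG]
      | v :: t =>
        by_cases hv : v = -1
        · rw [pvG.eq_def]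
          simp only [if_pos hv]
          rw [ihn t (by simpa using hl)]
          subst hv
          simp
        · rw [pvG.eq_def]
          simp only [if_neg hv]
          rw [ihn (t.map (fun x => if x = v then -1 else x)) (by simpa using hl)]
          rw [pv_filter_map v hv t]
          set F := t.filter (fun x => x ≠ -1) with hF
          have hcnt : F.count v = t.count v := by
            rw [hF, List.count_filter]
            simp [hv]
          have hlen : (F.filter (fun x => x ≠ v)).length + F.count v = F.length :=
            pv_len_filter_ne v F
          have hfin : (F.filter (fun x => x ≠ v)).toFinset = F.toFinset.erase v := by
            ext x
            simp [List.mem_toFinset, Finset.mem_erase, and_comm]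
          have hcons : (v :: t).filter (fun x => x ≠ -1) = v :: F := by
            simp [hF, hv]
          rw [hcons, hfin]
          by_cases hmem : v ∈ F
          · have h1 : (v :: F).toFinset = F.toFinset := by
              simp [List.toFinset_cons, Finset.insert_eq_self, List.mem_toFinset, hmem]
            have h2 : (F.toFinset.erase v).card + 1 = F.toFinset.card :=
              Finset.card_erase_add_one (List.mem_toFinset.mpr hmem)
            rw [h1]
            simp only [List.length_cons]
            push_cast
            omega
          · have h1 : (v :: F).toFinset.card = F.toFinset.card + 1 := by
              rw [List.toFinset_cons, Finset.card_insert_of_notMem (by simp [List.mem_toFinset, hmem])]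
            have h2 : F.toFinset.erase v = F.toFinset :=
              Finset.erase_eq_of_notMem (by simp [List.mem_toFinset, hmem])
            have h3 : F.count v = 0 := List.count_eq_zero.mpr hmem
            rw [h1, h2]
            simp only [List.length_cons]
            push_cast
            omega
  exact main l.length l (Nat.le_refl _)

theorem pv_foldl_guard (l : List Int) (d : PySem.Dict Int Int) :
    l.foldl (fun d v => if v ≠ -1 then d.insert v (d.getD v 0 + 1) else d) d
      = (l.filter (fun x => x ≠ -1)).foldl (fun d x => d.insert x (d.getD x 0 + 1)) d := by
  induction l generalizing d with
  | nil => rfl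
  | cons a l ih =>
    rw [List.foldl_cons, List.filter_cons]
    by_cases ha : a = -1
    · rw [show (if a ≠ -1 then d.insert a (d.getD a 0 + 1) else d) = d from if_neg (by simp [ha])]
      rw [if_neg (by simp [ha])]
      exact ih d
    · rw [show (if a ≠ -1 then d.insert a (d.getD a 0 + 1) else d)
            = d.insert a (d.getD a 0 + 1) from if_pos ha]
      rw [if_pos (by simp [ha]), List.foldl_cons]
      exact ih _

theorem pv_foldl_sub_one (vs : List Int) (r : Int) :
    vs.foldl (fun r c => r + (c - 1)) r = r + vs.sum - vs.length := by
  induction vs generalizing r with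
  | nil => simp
  | cons c vs ih =>
    rw [List.foldl_cons, ih]
    simp only [List.sum_cons, List.length_cons]
    push_cast
    ring

theorem alt_spec (l : List Int) :
    numberOfRejections_alt l = ((l.filter (fun x => x ≠ -1)).length : Int)
            - ((l.filter (fun x => x ≠ -1)).toFinset.card : Int) := by
  unfold numberOfRejections_alt
  rw [pv_foldl_guard, PySem.Dict.foldl_insert_getD_add_one_eq_counter]
  set F := l.filter (fun x => x ≠ -1) with hF
  have hvals : (PySem.Dict.values (PySem.Dict.counter F))
      = (PySem.Set.ofList F).map (fun k => (F.count k : Int)) := by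
    simp only [PySem.Dict.values, PySem.Dict.items_counter, List.map_map]
    rfl
  show (PySem.Dict.counter F).values.foldl (fun rej c => rej + (c - 1)) 0
      = (F.length : Int) - (F.toFinset.card : Int)
  rw [hvals, pv_foldl_sub_one, zero_add]
  have hperm : (PySem.Set.ofList F : List Int).Perm F.dedup := by
    apply (List.perm_ext_iff_of_nodup (PySem.Set.nodup_ofList F) F.nodup_dedup).mpr
    intro x
    rw [PySem.Set.mem_ofList, List.mem_dedup]
  have hsum : ((PySem.Set.ofList F).map (fun k => (F.count k : Int))).sum
      = ((F.dedup.map (fun k => F.count k)).sum : Nat) := by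
    rw [List.Perm.sum_eq (hperm.map (fun k => (F.count k : Int)))]
    simp only [Nat.cast_list_sum, List.map_map]
    rfl
  rw [hsum, List.sum_map_count_dedup_eq_length, List.length_map, hperm.length_eq,
      List.card_toFinset]

-- ===== VERDICT (by name: the statement is the Claim_ definition above) =====
theorem numberOfRejections_spec : Claim_equal_numberOfRejections := by
  intro requests _
  unfold Spec_numberOfRejections numberOfRejections
  rw [pvOuterA_spec requests.length requests 0 0 (by omega), List.drop_zero, pvG_spec, alt_spec, zero_add]
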